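-- pv_equiv track=rewrite | github.com/alexsmr91/pythonProject | dz_1_2.py | sum_list_1
-- ===== SOURCE A (Python) =====
-- def sum_list_1(dataset: list) -> int:
--     """Вычисляет сумму чисел списка dataset, сумма цифр которых делится нацело на 7"""
--     # место для написания кода
--     sum = 0
--     for numb in dataset:
--         sum_dig = 0
--         numb_dig = numb
--         while numb_dig > 0:
--             sum_dig = sum_dig + numb_dig % 10
--             numb_dig = numb_dig // 10
--         if (sum_dig % 7) == 0:
--             sum = sum + numb
--
--     return sum  # Верните значение полученной суммы
-- ===== SOURCE B (Python) =====
-- def digit_sum(n):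
--     return 0 if n <= 0 else n % 10 + digit_sum(n // 10)
--
-- def sum_list_1(dataset: list) -> int:
--     return sum(x for x in dataset if digit_sum(x) % 7 == 0)
-- ===== Notes on version B (the rewrite author's own statement) =====
-- stated objective: simpler
-- what changed: Replaces A's explicit accumulator loop with inner while-loop by a recursive digit_sum helper and a single filtered sum comprehension.
import Mathlib
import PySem

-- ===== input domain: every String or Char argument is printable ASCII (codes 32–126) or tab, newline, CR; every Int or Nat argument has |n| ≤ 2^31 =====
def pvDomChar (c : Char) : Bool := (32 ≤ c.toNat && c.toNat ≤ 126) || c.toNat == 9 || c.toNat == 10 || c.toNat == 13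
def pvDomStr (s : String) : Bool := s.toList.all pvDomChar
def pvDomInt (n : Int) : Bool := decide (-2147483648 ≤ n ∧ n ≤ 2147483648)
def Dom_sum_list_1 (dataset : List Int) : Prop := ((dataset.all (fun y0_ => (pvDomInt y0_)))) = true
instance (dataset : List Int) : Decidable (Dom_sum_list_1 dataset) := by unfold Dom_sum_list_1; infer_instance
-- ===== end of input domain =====

-- B replaces A's inline while-loop digit accumulation with a recursive digit_sum helper and one filtered sum (simpler decomposition).


-- ===== PORT A =====
-- inner while loop of A: accumulates sum_dig while numb_dig > 0
def pvDigitLoopA (sum_dig numb_dig : Int) : Int :=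
  if h : numb_dig > 0 then
    pvDigitLoopA (sum_dig + PySem.Int.mod numb_dig 10) (PySem.Int.floordiv numb_dig 10)
  else sum_dig
termination_by numb_dig.toNat
decreasing_by
  simp only [PySem.Int.floordiv_eq_ediv_of_pos (by omega : (0:Int) < 10)]
  omega

def sum_list_1 (dataset : List Int) : Int :=
  dataset.foldl (fun sum numb =>
    if PySem.Int.mod (pvDigitLoopA 0 numb) 7 = 0 then sum + numb else sum) 0

-- ===== PORT B =====
def pvDigitSum (n : Int) : Int :=
  if h : n ≤ 0 then 0
  else PySem.Int.mod n 10 + pvDigitSum (PySem.Int.floordiv n 10)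
termination_by n.toNat
decreasing_by
  simp only [PySem.Int.floordiv_eq_ediv_of_pos (by omega : (0:Int) < 10)]
  omega

def sum_list_1_alt (dataset : List Int) : Int :=
  (dataset.filter (fun x => PySem.Int.mod (pvDigitSum x) 7 = 0)).sum

-- ===== PRECONDITION & SPEC =====
def Spec_sum_list_1 (dataset : List Int) (out : Int) : Prop := out = sum_list_1_alt dataset
instance (dataset : List Int) (out : Int) : Decidable (Spec_sum_list_1 dataset out) := by unfold Spec_sum_list_1; infer_instance

-- ===== CLAIM (what is proved, stated in full; the proofs are below) =====
def Claim_equal_sum_list_1 : Prop := ∀ (dataset : List Int), Dom_sum_list_1 dataset → Spec_sum_list_1 dataset (sum_list_1 dataset)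

-- ===== LEMMAS AND PROOFS =====
theorem pvDigitLoopA_eq (numb_dig : Int) : ∀ sum_dig, pvDigitLoopA sum_dig numb_dig = sum_dig + pvDigitSum numb_dig := by
  induction numb_dig using pvDigitSum.induct with
  | case1 n h =>
    intro s
    rw [pvDigitLoopA, pvDigitSum]
    simp [h, show ¬ n > 0 by omega]
  | case2 n h ih =>
    intro s
    rw [pvDigitLoopA, pvDigitSum]
    rw [dif_pos (show n > 0 by omega), dif_neg h, ih]
    ring

theorem foldl_filter_sum (l : List Int) : ∀ s : Int,
    l.foldl (fun sum numb => if PySem.Int.mod (pvDigitLoopA 0 numb) 7 = 0 then sum + numb else sum) s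
      = s + (l.filter (fun x => PySem.Int.mod (pvDigitSum x) 7 = 0)).sum := by
  induction l with
  | nil => intro s; simp
  | cons x xs ih =>
    intro s
    simp only [List.foldl_cons, List.filter_cons]
    rw [pvDigitLoopA_eq, zero_add]
    by_cases h : PySem.Int.mod (pvDigitSum x) 7 = 0
    · rw [if_pos h, if_pos (by exact_mod_cast decide_eq_true h), ih, List.sum_cons]
      ring
    · rw [if_neg h, if_neg (by simpa [PySem.Int.mod_eq_zero_iff_dvd] using h), ih]

-- ===== VERDICT (by name: the statement is the Claim_ definition above) =====
theorem sum_list_1_spec : Claim_equal_sum_list_1 := by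
  intro dataset _
  unfold Spec_sum_list_1 sum_list_1 sum_list_1_alt
  rw [foldl_filter_sum]
  ring
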